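-- pv_equiv track=rewrite | github.com/JuanMarcia/Algoritmos-y-Estructura-de-Datos | EjerciciosCap11/Ejercicio11_4.py | multiplicativeHash
-- ===== SOURCE A (Python) =====
-- def multiplicativeHash(key):
--
--     hashVal = 0
--     byteMask = 0xFF
--     prime1 = 53
--     prime2 = 89
--     while key > 0:
--         byte = key & byteMask
--         hashVal = hashVal * prime1 + (byte + prime2)
--         key >>= 8
--     return hashVal
-- ===== SOURCE B (Python) =====
-- def multiplicativeHash(key):
--     # extract little-endian bytes, then power-weighted sum (LSB gets highest power of 53)
--     byts = []
--     while key > 0: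
--         byts.append(key & 0xFF)
--         key >>= 8
--     n = len(byts)
--     return sum((b + 89) * 53 ** (n - 1 - i) for i, b in enumerate(byts))
-- ===== Notes on version B (the rewrite author's own statement) =====
-- stated objective: alternative
-- what changed: Replaced the single-pass Horner multiply-accumulate with a two-pass decomposition: first extract the little-endian byte list, then compute the hash as an explicit power-weighted sum where the least-significant byte carries the highest power of the multiplier.
import Mathlib
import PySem

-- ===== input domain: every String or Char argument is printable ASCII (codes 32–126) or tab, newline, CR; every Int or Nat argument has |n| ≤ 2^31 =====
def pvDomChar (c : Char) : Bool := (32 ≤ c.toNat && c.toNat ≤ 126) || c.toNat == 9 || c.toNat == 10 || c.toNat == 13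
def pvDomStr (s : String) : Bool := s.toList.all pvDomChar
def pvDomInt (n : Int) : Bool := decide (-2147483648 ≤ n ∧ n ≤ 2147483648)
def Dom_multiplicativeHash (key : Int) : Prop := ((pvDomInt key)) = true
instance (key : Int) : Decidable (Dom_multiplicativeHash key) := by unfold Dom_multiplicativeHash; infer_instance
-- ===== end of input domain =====

-- B replaces A's Horner multiply-accumulate loop with a two-pass extract-bytes-then-power-weighted-sum; alternative decomposition, same cost.

-- ===== PORT A =====
-- The loop runs while key > 0, so key is positive throughout; for positive k,
-- Python's `k & 0xFF` is `k % 256` and `k >> 8` is `k / 256`, exact on naturals.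
def multiplicativeHashLoop (k : Nat) (hashVal : Int) : Int :=
  if k > 0 then
    multiplicativeHashLoop (k / 256) (hashVal * 53 + ((k % 256 : Nat) + 89))
  else hashVal
decreasing_by exact Nat.div_lt_self (by omega) (by omega)

def multiplicativeHash (key : Int) : Int := multiplicativeHashLoop key.toNat 0

-- ===== PORT B =====
-- bytes extraction loop (little-endian), as in Source B
def pvBytes (k : Nat) : List Nat :=
  if k > 0 then (k % 256) :: pvBytes (k / 256) else []
decreasing_by exact Nat.div_lt_self (by omega) (by omega)

def multiplicativeHash_alt (key : Int) : Int :=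
  let byts := pvBytes key.toNat
  let n := byts.length
  ((PySem.List.enumerate byts).map (fun p => ((p.2 : Int) + 89) * 53 ^ (n - 1 - p.1.toNat))).sum

-- ===== PRECONDITION & SPEC =====
def Spec_multiplicativeHash (key : Int) (out : Int) : Prop := out = multiplicativeHash_alt key
instance (key : Int) (out : Int) : Decidable (Spec_multiplicativeHash key out) := by unfold Spec_multiplicativeHash; infer_instance

-- ===== CLAIM (what is proved, stated in full; the proofs are below) =====
def Claim_equal_multiplicativeHash : Prop := ∀ (key : Int), Dom_multiplicativeHash key → Spec_multiplicativeHash key (multiplicativeHash key)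

-- ===== LEMMAS AND PROOFS =====

-- the power-weighted sum over a byte list, shifted: weights relative to list tail
def pvS (bs : List Nat) : Int :=
  match bs with
  | [] => 0
  | b :: rest => ((b : Int) + 89) * 53 ^ rest.length + pvS rest

lemma enumerate_sum_shift (bs : List Nat) (s : Nat) (n : Nat) (h : n = s + bs.length) :
    ((PySem.List.enumerate bs (s : Int)).map (fun p => ((p.2 : Int) + 89) * 53 ^ (n - 1 - p.1.toNat))).sum
      = pvS bs := by
  induction bs generalizing s n with
  | nil => simp [PySem.List.enumerate_nil, pvS]
  | cons b rest ih =>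
    rw [show ((s : Int)) = ((s : Nat) : Int) from rfl]
    rw [PySem.List.enumerate_cons]
    simp only [List.map_cons, List.sum_cons, pvS]
    have h1 : ((s : Int) + 1) = ((s + 1 : Nat) : Int) := by push_cast; ring
    rw [h1, ih (s + 1) n (by simp at h ⊢; omega)]
    have : ((s : Int)).toNat = s := Int.toNat_natCast s
    rw [this]
    have : n - 1 - s = rest.length := by simp at h; omega
    rw [this]

lemma alt_eq_pvS (key : Int) : multiplicativeHash_alt key = pvS (pvBytes key.toNat) := by
  unfold multiplicativeHash_alt
  exact enumerate_sum_shift _ 0 _ (by simp)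

lemma loop_eq (k : Nat) (h : Int) :
    multiplicativeHashLoop k h = h * 53 ^ (pvBytes k).length + pvS (pvBytes k) := by
  induction k using Nat.strong_induction_on generalizing h with
  | _ k ih =>
    rw [multiplicativeHashLoop, pvBytes]
    by_cases hk : k > 0
    · simp only [hk, if_true]
      rw [ih (k / 256) (Nat.div_lt_self hk (by omega))]
      simp only [List.length_cons, pvS]
      push_cast
      ring
    · simp [hk, pvS]

-- ===== VERDICT (by name: the statement is the Claim_ definition above) =====
theorem multiplicativeHash_spec : Claim_equal_multiplicativeHash := by
  intro key _
  unfold Spec_multiplicativeHash multiplicativeHash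
  rw [alt_eq_pvS, loop_eq]
  ring
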